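-- pv_equiv track=rewrite | github.com/kr1hvik/Olympiaadid | eio2024-lv/2024-10-07-lv/vandra/gen/icheck.py | touch
-- ===== SOURCE A (Python) =====
-- def unify(ll):
-- 	t = []
-- 	ll.sort()
-- 	a, b1, b2 = ll[0]
-- 	for c, d1, d2 in ll:
-- 		if c > a or d1 > b2:
-- 			t.append((a, b1, b2))
-- 			a, b1, b2 = c, d1, d2
-- 		else:
-- 			b2 = d2
-- 	t.append((a, b1, b2))
-- 	ll[:] = t
--
-- def touch(l1, l2):
-- 	unify(l1); unify(l2)
-- 	i1, i2 = 0, 0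
-- 	while i1 < len(l1) and i2 < len(l2):
-- 		a, b1, b2 = l1[i1]
-- 		c, d1, d2 = l2[i2]
-- 		if a < c or a == c and b2 < d1:
-- 			i1 += 1
-- 			continue
-- 		if c < a or c == a and d2 < b1:
-- 			i2 += 1
-- 			continue
-- 		return True
-- 	return False
-- ===== SOURCE B (Python) =====
-- def _unify(ll):
--     t = []
--     for c, d1, d2 in sorted(ll):
--         if t and c <= t[-1][0] and d1 <= t[-1][2]:
--             a, b1, _ = t[-1]
--             t[-1] = (a, b1, d2)
--         else:
--             t.append((c, d1, d2))
--     ll[:] = t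
--     return t
--
-- def touch(l1, l2):
--     u1 = _unify(l1)
--     u2 = _unify(l2)
--     index = {}
--     for c, d1, d2 in u2:
--         index.setdefault(c, []).append((d1, d2))
--     return any(d1 <= b2 and b1 <= d2
--                for a, b1, b2 in u1
--                for d1, d2 in index.get(a, []))
-- ===== Notes on version B (the rewrite author's own statement) =====
-- stated objective: alternative
-- what changed: The merge pass is rewritten as a coalesce-with-the-last-output fold (no re-scan of the first element, no separate running (a,b1,b2) state), and the two-pointer simultaneous walk is replaced by a hash index of the second merged list keyed by interval start, probed once per interval of the first list with the same intersection predicate.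
-- crash fix: A raises IndexError (ll[0] on an empty list inside unify) whenever l1 or l2 is empty; B returns False there. — e.g. on touch([], [(0, 0, 0)]): A raises IndexError, B returns false
import Mathlib
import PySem

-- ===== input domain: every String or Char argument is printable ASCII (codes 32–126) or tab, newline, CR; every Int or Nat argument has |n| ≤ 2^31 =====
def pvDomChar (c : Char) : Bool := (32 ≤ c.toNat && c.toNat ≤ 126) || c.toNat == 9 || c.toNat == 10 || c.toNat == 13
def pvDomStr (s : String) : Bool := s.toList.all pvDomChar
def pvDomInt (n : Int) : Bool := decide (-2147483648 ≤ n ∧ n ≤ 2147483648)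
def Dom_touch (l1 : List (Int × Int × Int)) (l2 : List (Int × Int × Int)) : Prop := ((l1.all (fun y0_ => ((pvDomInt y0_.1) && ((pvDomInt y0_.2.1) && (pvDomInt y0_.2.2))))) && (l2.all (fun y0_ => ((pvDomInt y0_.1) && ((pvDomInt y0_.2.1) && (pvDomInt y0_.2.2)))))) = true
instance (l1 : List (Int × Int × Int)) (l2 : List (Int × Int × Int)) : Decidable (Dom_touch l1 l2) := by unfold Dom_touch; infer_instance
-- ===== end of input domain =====

-- B replaces A's restart-the-first-element merge pass by a coalesce-with-the-last fold and the
-- two-pointer walk by a start-keyed hash index probed per interval; return-value equivalence only: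
-- both Pythons write the coalesced lists back into l1/l2, but A duplicates an ill-formed first
-- interval (b1 > b2) in that side effect while B does not.

-- ===== PORT A =====
-- Python's tuple sort is lexicographic: sort key into the lexicographic order on Int × Int × Int.
def lexKey (t : Int × Int × Int) : Lex (Int × Lex (Int × Int)) := toLex (t.1, toLex (t.2.1, t.2.2))

def pySort3 (ll : List (Int × Int × Int)) : List (Int × Int × Int) := PySem.List.sorted ll lexKey

-- the body of unify's for-loop, state = ((a, b1, b2), t)
def unifyStepA (st : (Int × Int × Int) × List (Int × Int × Int)) (q : Int × Int × Int) :
    (Int × Int × Int) × List (Int × Int × Int) :=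
  if q.1 > st.1.1 ∨ q.2.1 > st.1.2.2 then (q, st.2 ++ [st.1]) else ((st.1.1, st.1.2.1, q.2.2), st.2)

-- unify(ll): sort, seed the state with ll[0], fold the loop over the whole sorted list.
def unifyA (ll : List (Int × Int × Int)) : List (Int × Int × Int) :=
  match pySort3 ll with
  | [] => []   -- Python raises IndexError at ll[0]; these inputs are excluded by Pre_touch
  | x :: rest =>
    let r := (x :: rest).foldl unifyStepA (x, [])
    r.2 ++ [r.1]

-- the while-loop over indices i1, i2 (always in range where Python reads)
def touchLoop (u v : List (Int × Int × Int)) (i1 i2 : Nat) : Bool :=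
  if h : i1 < u.length ∧ i2 < v.length then
    let p := u[i1]'h.1
    let q := v[i2]'h.2
    if p.1 < q.1 ∨ (p.1 = q.1 ∧ p.2.2 < q.2.1) then touchLoop u v (i1 + 1) i2
    else if q.1 < p.1 ∨ (q.1 = p.1 ∧ q.2.2 < p.2.1) then touchLoop u v i1 (i2 + 1)
    else true
  else false
termination_by (u.length - i1) + (v.length - i2)
decreasing_by all_goals omega

def touch (l1 : List (Int × Int × Int)) (l2 : List (Int × Int × Int)) : Bool :=
  touchLoop (unifyA l1) (unifyA l2) 0 0

-- ===== PORT B =====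
-- _unify's loop body: coalesce the incoming triple with the last element of t, or append it.
def unifyStepB (t : List (Int × Int × Int)) (q : Int × Int × Int) : List (Int × Int × Int) :=
  match t.getLast? with
  | some l => if q.1 ≤ l.1 ∧ q.2.1 ≤ l.2.2 then t.dropLast ++ [(l.1, l.2.1, q.2.2)] else t ++ [q]
  | none => [q]

def unifyB (ll : List (Int × Int × Int)) : List (Int × Int × Int) :=
  (pySort3 ll).foldl unifyStepB []

-- index.setdefault(c, []).append((d1, d2)) over u2
def buildIndex (u : List (Int × Int × Int)) : PySem.Dict Int (List (Int × Int)) :=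
  u.foldl (fun d q => d.modify q.1 [] (· ++ [q.2])) PySem.Dict.empty

def touch_alt (l1 : List (Int × Int × Int)) (l2 : List (Int × Int × Int)) : Bool :=
  let u1 := unifyB l1
  let u2 := unifyB l2
  let index := buildIndex u2
  u1.any (fun p => (index.getD p.1 []).any (fun r => decide (r.1 ≤ p.2.2 ∧ p.2.1 ≤ r.2)))

-- ===== PRECONDITION & SPEC =====
-- Python's unify reads ll[0]: A raises IndexError when either list is empty.
def Pre_touch (l1 : List (Int × Int × Int)) (l2 : List (Int × Int × Int)) : Prop :=
  l1 ≠ [] ∧ l2 ≠ []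
instance (l1 : List (Int × Int × Int)) (l2 : List (Int × Int × Int)) : Decidable (Pre_touch l1 l2) := by
  unfold Pre_touch; infer_instance

def pvWitness_touch : (List (Int × Int × Int)) × (List (Int × Int × Int)) :=
  ([(1, 2, 5), (1, 4, 7)], [(1, 6, 9), (2, 0, 1)])

-- A raises IndexError (ll[0] on an empty list inside unify) whenever l1 or l2 is empty; B returns False there.
def Raises_touch (l1 : List (Int × Int × Int)) (l2 : List (Int × Int × Int)) : Prop :=
  l1 = [] ∨ l2 = []
instance (l1 : List (Int × Int × Int)) (l2 : List (Int × Int × Int)) : Decidable (Raises_touch l1 l2) := by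
  unfold Raises_touch; infer_instance
def pvRaiseWitness_touch : (List (Int × Int × Int)) × (List (Int × Int × Int)) := ([], [(0, 0, 0)])
def pvRaiseWitnessOut_touch : Bool := false

def Spec_touch (l1 : List (Int × Int × Int)) (l2 : List (Int × Int × Int)) (out : Bool) : Prop :=
  out = touch_alt l1 l2
instance (l1 : List (Int × Int × Int)) (l2 : List (Int × Int × Int)) (out : Bool) : Decidable (Spec_touch l1 l2 out) := by
  unfold Spec_touch; infer_instance

-- ===== CLAIM (what is proved, stated in full; the proofs are below) =====
def Claim_equal_touch : Prop := ∀ (l1 : List (Int × Int × Int)) (l2 : List (Int × Int × Int)), Dom_touch l1 l2 → Pre_touch l1 l2 → Spec_touch l1 l2 (touch l1 l2)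
def Claim_raises_touch : Prop := (∀ (l1 : List (Int × Int × Int)) (l2 : List (Int × Int × Int)), Dom_touch l1 l2 → Raises_touch l1 l2 → ¬ Pre_touch l1 l2) ∧ (Dom_touch (pvRaiseWitness_touch.1) (pvRaiseWitness_touch.2) ∧ Raises_touch (pvRaiseWitness_touch.1) (pvRaiseWitness_touch.2) ∧ touch_alt (pvRaiseWitness_touch.1) (pvRaiseWitness_touch.2) = pvRaiseWitnessOut_touch)

-- ===== LEMMAS AND PROOFS =====
-- the order on (start, lower bound) that both merged lists satisfy
def pairLE (p q : Int × Int × Int) : Prop := p.1 < q.1 ∨ (p.1 = q.1 ∧ p.2.1 ≤ q.2.1)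

-- the touching predicate the two-pointer walk decides
def Tpred (p q : Int × Int × Int) : Prop := p.1 = q.1 ∧ q.2.1 ≤ p.2.2 ∧ p.2.1 ≤ q.2.2

theorem pairLE_refl (p : Int × Int × Int) : pairLE p p := by
  unfold pairLE; omega

theorem pairLE_trans {p q r : Int × Int × Int} (h1 : pairLE p q) (h2 : pairLE q r) : pairLE p r := by
  unfold pairLE at *; omega

theorem lexKey_le_pairLE {p q : Int × Int × Int} (h : lexKey p ≤ lexKey q) : pairLE p q := by
  unfold lexKey at h
  rcases Prod.Lex.le_iff.1 h with h1 | ⟨h1, h2⟩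
  · exact Or.inl h1
  · refine Or.inr ⟨h1, ?_⟩
    rcases Prod.Lex.le_iff.1 h2 with h3 | ⟨h3, _⟩
    · exact le_of_lt h3
    · exact le_of_eq h3

theorem sorted_pairLE (ll : List (Int × Int × Int)) : (pySort3 ll).Pairwise pairLE :=
  (PySem.List.sorted_pairwise ll lexKey).imp (fun h => lexKey_le_pairLE h)

theorem monoA (s : List (Int × Int × Int)) :
    ∀ (cur : Int × Int × Int) (t : List (Int × Int × Int)),
      s.Pairwise pairLE → (∀ q ∈ s, pairLE cur q) → (t ++ [cur]).Pairwise pairLE →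
      ((s.foldl unifyStepA (cur, t)).2 ++ [(s.foldl unifyStepA (cur, t)).1]).Pairwise pairLE := by
  induction s with
  | nil => intro cur t _ _ ht; simpa using ht
  | cons q s ih =>
    intro cur t hs hcur ht
    have hs' := (List.pairwise_cons.1 hs).2
    have hqs := (List.pairwise_cons.1 hs).1
    simp only [List.foldl_cons]
    unfold unifyStepA
    by_cases hc : q.1 > cur.1 ∨ q.2.1 > cur.2.2
    · rw [if_pos hc]
      apply ih q (t ++ [cur]) hs' hqs
      rw [List.pairwise_append]
      refine ⟨ht, List.pairwise_singleton _ _, ?_⟩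
      intro e he b hb
      rw [List.mem_singleton] at hb
      rw [hb]
      have hcq : pairLE cur q := hcur q List.mem_cons_self
      rcases List.mem_append.1 he with he | he
      · have hec : pairLE e cur := by
          rw [List.pairwise_append] at ht
          exact ht.2.2 e he cur (List.mem_singleton.2 rfl)
        exact pairLE_trans hec hcq
      · rw [List.mem_singleton] at he; subst he; exact hcq
    · rw [if_neg hc]
      apply ih (cur.1, cur.2.1, q.2.2) t hs'
      · intro r hr
        have h1 : pairLE cur r := hcur r (List.mem_cons_of_mem _ hr)
        unfold pairLE at h1 ⊢
        dsimp only
        omega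
      · rw [List.pairwise_append] at ht ⊢
        refine ⟨ht.1, List.pairwise_singleton _ _, ?_⟩
        intro e he b hb
        rw [List.mem_singleton] at hb
        rw [hb]
        have h2 : pairLE e cur := ht.2.2 e he cur (List.mem_singleton.2 rfl)
        unfold pairLE at h2 ⊢
        dsimp only
        omega

theorem unifyA_cons (ll : List (Int × Int × Int)) (x : Int × Int × Int)
    (rest : List (Int × Int × Int)) (h : pySort3 ll = x :: rest) :
    unifyA ll = ((x :: rest).foldl unifyStepA (x, [])).2 ++ [((x :: rest).foldl unifyStepA (x, [])).1] := by
  unfold unifyA; rw [h]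

theorem unifyA_mono (ll : List (Int × Int × Int)) : (unifyA ll).Pairwise pairLE := by
  cases h : pySort3 ll with
  | nil => unfold unifyA; rw [h]; exact List.Pairwise.nil
  | cons x rest =>
    rw [unifyA_cons ll x rest h]
    have hp := sorted_pairLE ll
    rw [h] at hp
    have hx : ∀ q ∈ x :: rest, pairLE x q := by
      intro q hq
      rcases List.mem_cons.1 hq with rfl | hq
      · exact pairLE_refl _
      · exact (List.pairwise_cons.1 hp).1 q hq
    exact monoA (x :: rest) x [] hp hx (List.pairwise_singleton _ _)

theorem corrAB (s : List (Int × Int × Int)) :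
    ∀ (cur : Int × Int × Int) (u : List (Int × Int × Int)),
      s.foldl unifyStepB (u ++ [cur]) =
        (s.foldl unifyStepA (cur, u)).2 ++ [(s.foldl unifyStepA (cur, u)).1] := by
  induction s with
  | nil => intro cur u; rfl
  | cons q s ih =>
    intro cur u
    simp only [List.foldl_cons]
    by_cases hc : q.1 > cur.1 ∨ q.2.1 > cur.2.2
    · have hA : unifyStepA (cur, u) q = (q, u ++ [cur]) := by
        unfold unifyStepA; rw [if_pos hc]
      have hB : unifyStepB (u ++ [cur]) q = (u ++ [cur]) ++ [q] := by
        have hn : ¬ (q.1 ≤ cur.1 ∧ q.2.1 ≤ cur.2.2) := by omega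
        simp only [unifyStepB, List.getLast?_concat]
        rw [if_neg hn]
      rw [hA, hB]
      exact ih q (u ++ [cur])
    · have hA : unifyStepA (cur, u) q = ((cur.1, cur.2.1, q.2.2), u) := by
        unfold unifyStepA; rw [if_neg hc]
      have hB : unifyStepB (u ++ [cur]) q = u ++ [(cur.1, cur.2.1, q.2.2)] := by
        have hc' : q.1 ≤ cur.1 ∧ q.2.1 ≤ cur.2.2 := by omega
        simp only [unifyStepB, List.getLast?_concat]
        rw [if_pos hc', List.dropLast_concat]
      rw [hA, hB]
      exact ih (cur.1, cur.2.1, q.2.2) u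

theorem foldA_prefix (s : List (Int × Int × Int)) :
    ∀ (cur : Int × Int × Int) (P u : List (Int × Int × Int)),
      s.foldl unifyStepA (cur, P ++ u) =
        ((s.foldl unifyStepA (cur, u)).1, P ++ (s.foldl unifyStepA (cur, u)).2) := by
  induction s with
  | nil => intro cur P u; rfl
  | cons q s ih =>
    intro cur P u
    simp only [List.foldl_cons]
    unfold unifyStepA
    by_cases hc : q.1 > cur.1 ∨ q.2.1 > cur.2.2
    · rw [if_pos hc, if_pos hc]
      simpa using ih q P (u ++ [cur])
    · rw [if_neg hc, if_neg hc]
      exact ih (cur.1, cur.2.1, q.2.2) P u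

theorem unifyB_cons (ll : List (Int × Int × Int)) (x : Int × Int × Int)
    (rest : List (Int × Int × Int)) (h : pySort3 ll = x :: rest) :
    unifyB ll = (rest.foldl unifyStepA (x, [])).2 ++ [(rest.foldl unifyStepA (x, [])).1] := by
  unfold unifyB
  rw [h]
  simp only [List.foldl_cons]
  show List.foldl unifyStepB ([] ++ [x]) rest = _
  exact corrAB rest x []

theorem mem_unifyA_iff (ll : List (Int × Int × Int)) (p : Int × Int × Int) :
    p ∈ unifyA ll ↔ p ∈ unifyB ll := by
  cases h : pySort3 ll with
  | nil =>
    unfold unifyA unifyB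
    rw [h]
    simp
  | cons x rest =>
    obtain ⟨a, b1, b2⟩ := x
    have hB := unifyB_cons ll (a, b1, b2) rest h
    have hA := unifyA_cons ll (a, b1, b2) rest h
    simp only [List.foldl_cons] at hA
    by_cases hd : b1 > b2
    · -- first A step duplicates the head
      have hstep : unifyStepA ((a, b1, b2), []) (a, b1, b2) = ((a, b1, b2), [(a, b1, b2)]) := by
        unfold unifyStepA
        rw [if_pos (by dsimp only; omega)]
        simp
      rw [hstep] at hA
      have hpre := foldA_prefix rest (a, b1, b2) [(a, b1, b2)] []
      simp only [List.append_nil] at hpre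
      rw [hpre] at hA
      -- so unifyA ll = (a,b1,b2) :: unifyB ll
      have hAx : unifyA ll = (a, b1, b2) :: unifyB ll := by
        rw [hA, hB]; simp
      -- and (a,b1,b2) is already a member of unifyB ll
      have hmem : (a, b1, b2) ∈ unifyB ll := by
        cases rest with
        | nil => rw [hB]; simp
        | cons q rest' =>
          have hp := sorted_pairLE ll
          rw [h] at hp
          have hxq : pairLE (a, b1, b2) q := (List.pairwise_cons.1 hp).1 q List.mem_cons_self
          have hstep2 : unifyStepA ((a, b1, b2), []) q = (q, [(a, b1, b2)]) := by
            unfold unifyStepA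
            unfold pairLE at hxq
            rw [if_pos (by dsimp only at hxq ⊢; omega)]
            simp
          rw [hB]
          simp only [List.foldl_cons, hstep2]
          have hpre2 := foldA_prefix rest' q [(a, b1, b2)] []
          simp only [List.append_nil] at hpre2
          rw [hpre2]
          simp
      rw [hAx]
      simp only [List.mem_cons]
      constructor
      · rintro (rfl | hp)
        · exact hmem
        · exact hp
      · exact Or.inr
    · -- first A step is a no-op
      have hstep : unifyStepA ((a, b1, b2), []) (a, b1, b2) = ((a, b1, b2), []) := by
        unfold unifyStepA
        rw [if_neg (by dsimp only; omega)]
      rw [hstep] at hA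
      rw [hA, hB]

theorem head_pairLE (v : List (Int × Int × Int)) (hv : v.Pairwise pairLE) (i : Nat)
    (hi : i < v.length) : ∀ q ∈ v.drop i, pairLE (v[i]'hi) q := by
  have h1 : (v.drop i).Pairwise pairLE := hv.sublist (List.drop_sublist i v)
  rw [List.drop_eq_getElem_cons hi] at h1
  intro q hq
  rw [List.drop_eq_getElem_cons hi] at hq
  rcases List.mem_cons.1 hq with rfl | hq
  · exact pairLE_refl _
  · exact (List.pairwise_cons.1 h1).1 q hq

theorem touchLoop_iff (u v : List (Int × Int × Int))
    (hu : u.Pairwise pairLE) (hv : v.Pairwise pairLE) (i1 i2 : Nat) :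
    touchLoop u v i1 i2 = true ↔ ∃ p ∈ u.drop i1, ∃ q ∈ v.drop i2, Tpred p q := by
  fun_induction touchLoop u v i1 i2 with
  | case1 i1 i2 h p q hc ih =>
    rw [ih, List.drop_eq_getElem_cons h.1]
    constructor
    · rintro ⟨p', hp', rest⟩
      exact ⟨p', List.mem_cons_of_mem _ hp', rest⟩
    · rintro ⟨p', hp', q', hq', ht⟩
      rcases List.mem_cons.1 hp' with rfl | hp'
      · exfalso
        have hle : pairLE q q' := head_pairLE v hv i2 h.2 q' hq'
        have ht' : Tpred p q' := ht
        unfold Tpred at ht'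
        unfold pairLE at hle
        omega
      · exact ⟨p', hp', q', hq', ht⟩
  | case2 i1 i2 h p q hc1 hc2 ih =>
    rw [ih, List.drop_eq_getElem_cons h.2]
    constructor
    · rintro ⟨p', hp', q', hq', ht⟩
      exact ⟨p', hp', q', List.mem_cons_of_mem _ hq', ht⟩
    · rintro ⟨p', hp', q', hq', ht⟩
      rcases List.mem_cons.1 hq' with rfl | hq'
      · exfalso
        have hle : pairLE p p' := head_pairLE u hu i1 h.1 p' hp'
        have ht' : Tpred p' q := ht
        unfold Tpred at ht'
        unfold pairLE at hle
        omega
      · exact ⟨p', hp', q', hq', ht⟩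
  | case3 i1 i2 h p q hc1 hc2 =>
    refine ⟨fun _ => ⟨p, ?_, q, ?_, ?_⟩, fun _ => rfl⟩
    · rw [List.drop_eq_getElem_cons h.1]; exact List.mem_cons_self
    · rw [List.drop_eq_getElem_cons h.2]; exact List.mem_cons_self
    · unfold Tpred; omega
  | case4 i1 i2 h =>
    refine iff_of_false (by simp) ?_
    rintro ⟨p', hp', q', hq', -⟩
    rcases not_and_or.1 h with h1 | h1
    · rw [List.drop_eq_nil_of_le (by omega)] at hp'
      exact List.not_mem_nil hp'
    · rw [List.drop_eq_nil_of_le (by omega)] at hq'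
      exact List.not_mem_nil hq'

theorem touch_alt_iff (l1 l2 : List (Int × Int × Int)) :
    touch_alt l1 l2 = true ↔ ∃ p ∈ unifyB l1, ∃ q ∈ unifyB l2, Tpred p q := by
  unfold touch_alt buildIndex
  simp only [PySem.Dict.getD_foldl_modify_append, PySem.Dict.getD_empty, List.nil_append]
  simp only [List.any_eq_true, List.mem_map, List.mem_filter, beq_iff_eq, decide_eq_true_eq]
  constructor
  · rintro ⟨p, hp, r, ⟨q, ⟨hq, hq1⟩, rfl⟩, h2, h3⟩
    exact ⟨p, hp, q, hq, hq1.symm, h2, h3⟩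
  · rintro ⟨p, hp, q, hq, h1, h2, h3⟩
    exact ⟨p, hp, q.2, ⟨q, ⟨hq, h1.symm⟩, rfl⟩, h2, h3⟩

-- ===== VERDICT (by name: the statement is the Claim_ definition above) =====
theorem touch_spec : Claim_equal_touch := by
  intro l1 l2 _ _
  unfold Spec_touch
  have h : touch l1 l2 = true ↔ touch_alt l1 l2 = true := by
    rw [touch_alt_iff]
    unfold touch
    rw [touchLoop_iff _ _ (unifyA_mono l1) (unifyA_mono l2)]
    simp only [List.drop_zero]
    constructor
    · rintro ⟨p, hp, q, hq, ht⟩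
      exact ⟨p, (mem_unifyA_iff l1 p).1 hp, q, (mem_unifyA_iff l2 q).1 hq, ht⟩
    · rintro ⟨p, hp, q, hq, ht⟩
      exact ⟨p, (mem_unifyA_iff l1 p).2 hp, q, (mem_unifyA_iff l2 q).2 hq, ht⟩
  cases ha : touch l1 l2 <;> cases hb : touch_alt l1 l2 <;> simp_all

theorem touch_raises : Claim_raises_touch := by
  unfold Claim_raises_touch
  constructor
  · intro l1 l2 _ hr hp
    rcases hr with h | h <;> [exact hp.1 h; exact hp.2 h]
  · exact ⟨by decide, by decide, by decide⟩

-- self-check: at the raise witness ([], [(0,0,0)]) — where A raises IndexError — B indeed returns false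
theorem pvRaiseWitness_ok : touch_alt ([] : List (Int × Int × Int)) [((0 : Int), (0 : Int), (0 : Int))] = false := by
  have h := touch_raises
  unfold Claim_raises_touch at h
  exact h.2.2.2
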